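-- pv_equiv track=rewrite | github.com/ss-leg-al/PythonProgramming | get_index_terms.py | get_index_terms
-- ===== SOURCE A (Python) =====
-- def get_index_terms( mt_list):
--     nouns = []
--     indexterms=('NNG','NNP','SL','SN','SH')
--     s=''
--     count=0
--     for i in range(len(mt_list)):
--         if mt_list[i][1] in indexterms:
--             nouns.append(mt_list[i][0])
--             count+=1
--             s+=mt_list[i][0]
--             if i==(len(mt_list)-1) and count>1:
--                 nouns.append(s)
--         else:
--             if count>1:
--                 nouns.append(s)
--             s=''
--             count=0
--
--     return nouns
-- ===== SOURCE B (Python) =====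
-- def get_index_terms(mt_list):
--     indexterms = ('NNG', 'NNP', 'SL', 'SN', 'SH')
--     out = []
--     i, n = 0, len(mt_list)
--     while i < n:
--         if mt_list[i][1] not in indexterms:
--             i += 1
--             continue
--         # scan ahead to find the extent of this index-term run
--         j = i + 1
--         while j < n and mt_list[j][1] in indexterms:
--             j += 1
--         words = [w for w, _ in mt_list[i:j]]
--         out += words
--         if j - i > 1:
--             out.append(''.join(words))
--         i = j
--     return out
-- ===== Notes on version B (the rewrite author's own statement) =====
-- stated objective: alternative
-- what changed: B is an index-jumping scan: an outer loop that skips non-index tokens, an inner scan that finds the extent [i,j) of each maximal index-term run, then emits the whole run at once from the slice mt_list[i:j] (its words plus their join iff j-i>1), replacing A's per-element state machine with running string/count accumulators and a last-index special case.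
import Mathlib
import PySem

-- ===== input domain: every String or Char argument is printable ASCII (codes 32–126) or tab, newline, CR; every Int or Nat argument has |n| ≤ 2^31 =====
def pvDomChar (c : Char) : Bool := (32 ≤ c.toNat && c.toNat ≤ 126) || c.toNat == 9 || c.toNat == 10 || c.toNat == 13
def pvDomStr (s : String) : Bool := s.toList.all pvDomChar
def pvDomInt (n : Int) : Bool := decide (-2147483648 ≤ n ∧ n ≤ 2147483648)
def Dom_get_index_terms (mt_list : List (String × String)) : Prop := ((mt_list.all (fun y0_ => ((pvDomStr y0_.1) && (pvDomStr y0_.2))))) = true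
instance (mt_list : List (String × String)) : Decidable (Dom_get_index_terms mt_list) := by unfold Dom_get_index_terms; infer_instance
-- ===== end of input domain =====

-- B replaces A's per-element state machine (running string, count, last-index special
-- case) with an index-jumping scan that finds the extent of each maximal index-term
-- run and emits the whole run at once from a slice (alternative decomposition).

-- ===== PORT A =====
-- the tag tuple; strings kept as List Char for the running concatenation `s`
def pvTagsA : List String := ["NNG", "NNP", "SL", "SN", "SH"]

-- one iteration of A's `for i in range(len(mt_list))` loop; state = (nouns, s, count)
def pvStepA (n : Int) (st : List String × List Char × Int) (p : Int × (String × String)) :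
    List String × List Char × Int :=
  let nouns := st.1; let s := st.2.1; let count := st.2.2
  let i := p.1; let w := p.2.1; let t := p.2.2
  if t ∈ pvTagsA then
    let nouns := nouns ++ [w]
    let count := count + 1
    let s := s ++ w.toList
    if i = n - 1 ∧ 1 < count then (nouns ++ [String.ofList s], s, count)
    else (nouns, s, count)
  else
    if 1 < count then (nouns ++ [String.ofList s], [], 0)
    else (nouns, [], 0)

def get_index_terms (mt_list : List (String × String)) : List String :=
  ((PySem.List.enumerate mt_list 0).foldl (pvStepA (mt_list.length : Int)) ([], [], 0)).1

-- ===== PORT B =====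
-- `mt_list[i][1] in indexterms` as a Bool predicate on a token
def pvIsTerm (p : String × String) : Bool := decide (p.2 ∈ pvTagsA)

-- B's outer while-loop, as recursion on the suffix mt_list[i:]; the inner
-- `while j < n and …` scan plus the slice mt_list[i:j] is takeWhile/dropWhile
def get_index_terms_alt : List (String × String) → List String
  | [] => []
  | (w, t) :: rest =>
    if pvIsTerm (w, t) then
      let words := w :: (rest.takeWhile pvIsTerm).map Prod.fst
      words ++ (if 1 < words.length then [PySem.Str.join "" words] else [])
        ++ get_index_terms_alt (rest.dropWhile pvIsTerm)
    else get_index_terms_alt rest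
  termination_by l => l.length
  decreasing_by
  · simpa using Nat.lt_succ_of_le (rest.dropWhile_sublist pvIsTerm).length_le
  · simp

-- ===== PRECONDITION & SPEC =====
def Spec_get_index_terms (mt_list : List (String × String)) (out : List String) : Prop := out = get_index_terms_alt mt_list
instance (mt_list : List (String × String)) (out : List String) : Decidable (Spec_get_index_terms mt_list out) := by unfold Spec_get_index_terms; infer_instance

-- ===== CLAIM (what is proved, stated in full; the proofs are below) =====
def Claim_equal_get_index_terms : Prop := ∀ (mt_list : List (String × String)), Dom_get_index_terms mt_list → Spec_get_index_terms mt_list (get_index_terms mt_list)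

-- ===== LEMMAS AND PROOFS =====

-- proof-only intermediate form: a run-accumulator loop, linking A's fold to B's scan
def pvFlushIf (run : List String) : List String :=
  run ++ (if 1 < run.length then [PySem.Str.join "" run] else [])

def pvFlushB (out run : List String) : List String := out ++ pvFlushIf run

def pvGoB (out run : List String) : List (String × String) → List String
  | [] => pvFlushB out run
  | (w, t) :: rest =>
    if t ∈ pvTagsA then pvGoB out (run ++ [w]) rest
    else if run ≠ [] then pvGoB (pvFlushB out run) [] rest
    else pvGoB out run rest

-- ''.join(run) is the concatenation of the runs' characters
lemma pv_join_empty (run : List String) :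
    PySem.Str.join "" run = String.ofList (run.flatMap String.toList) := by
  apply String.toList_inj.mp
  simp [pysem, PySem.Chars.join, List.intercalate]
  induction run with
  | nil => simp
  | cons h t ih => cases t <;> simp_all

-- invariant: A's fold over the enumerated tail equals the run-accumulator loop,
-- when nouns = out ++ run, s = the run's characters, count = the run's length
lemma pv_main (n : Int) (rest : List (String × String)) :
    ∀ (k : Int) (out run : List String),
      k + (rest.length : Int) = n →
      (rest = [] → run.length ≤ 1) →
      ((PySem.List.enumerate rest k).foldl (pvStepA n)
        (out ++ run, run.flatMap String.toList, (run.length : Int))).1 = pvGoB out run rest := by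
  induction rest with
  | nil =>
    intro k out run _ hnil
    have h : ¬ 1 < run.length := by have := hnil rfl; omega
    simp [PySem.List.enumerate_nil, pvGoB, pvFlushB, pvFlushIf, h]
  | cons hd tl ih =>
    intro k out run hk _
    obtain ⟨w, t⟩ := hd
    rw [PySem.List.enumerate_cons]
    simp only [List.foldl_cons]
    by_cases ht : t ∈ pvTagsA
    · -- index-term token: extend the run
      have hstep : pvStepA n (out ++ run, run.flatMap String.toList, (run.length : Int)) (k, (w, t))
          = if k = n - 1 ∧ 1 < (run.length : Int) + 1 then
              ((out ++ run ++ [w]) ++ [String.ofList (run.flatMap String.toList ++ w.toList)],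
                run.flatMap String.toList ++ w.toList, (run.length : Int) + 1)
            else (out ++ run ++ [w], run.flatMap String.toList ++ w.toList, (run.length : Int) + 1) := by
        simp [pvStepA, ht]
      rw [hstep]
      by_cases hlast : k = n - 1 ∧ 1 < (run.length : Int) + 1
      · -- last element of the list, run length (incl. w) > 1
        have htl : tl = [] := by
          have h0 : (tl.length : Int) = 0 := by
            simp only [List.length_cons] at hk; push_cast at hk; omega
          simpa using h0
        subst htl
        have h0 : 0 < run.length := by
          have := hlast.2; push_cast at this; omega
        have hne : run ≠ [] := by intro h; subst h; simp at h0
        rw [if_pos hlast]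
        simp [PySem.List.enumerate_nil, pvGoB, ht, pvFlushB, pvFlushIf, pv_join_empty, h0]
      · rw [if_neg hlast]
        have hk' : (k + 1) + (tl.length : Int) = n := by
          simp only [List.length_cons] at hk; push_cast at hk ⊢; omega
        have hnil' : tl = [] → (run ++ [w]).length ≤ 1 := by
          intro htl
          subst htl
          have hkn : k = n - 1 := by have h := hk'; simp only [List.length_nil, Int.natCast_zero] at h; omega
          have hc : ¬ (1 : Int) < (run.length : Int) + 1 := fun hc => hlast ⟨hkn, hc⟩
          have h0 : run.length = 0 := by omega
          simp [h0]
        have hrec := ih (k + 1) out (run ++ [w]) hk' hnil'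
        have hst : (out ++ (run ++ [w]), (run ++ [w]).flatMap String.toList,
            (((run ++ [w]).length : Nat) : Int))
            = ((out ++ run ++ [w] : List String),
               (run.flatMap String.toList ++ w.toList : List Char), ((run.length : Int) + 1)) := by
          simp
        rw [hst] at hrec
        rw [hrec]
        simp [pvGoB, ht]
    · -- non-index token: flush the run
      have hstep : pvStepA n (out ++ run, run.flatMap String.toList, (run.length : Int)) (k, (w, t))
          = if 1 < (run.length : Int) then
              (out ++ run ++ [String.ofList (run.flatMap String.toList)], [], 0)
            else (out ++ run, [], 0) := by
        simp [pvStepA, ht]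
      rw [hstep]
      have hk' : (k + 1) + (tl.length : Int) = n := by
        simp only [List.length_cons] at hk; push_cast at hk ⊢; omega
      have hrec : ∀ out', ((PySem.List.enumerate tl (k + 1)).foldl (pvStepA n)
          (out', [], 0)).1 = pvGoB out' [] tl := by
        intro out'
        have := ih (k + 1) out' [] hk' (fun _ => by simp)
        simpa using this
      by_cases hlen : 1 < (run.length : Int)
      · have hlen' : 1 < run.length := by exact_mod_cast hlen
        have hne : run ≠ [] := by intro h; subst h; simp at hlen'
        rw [if_pos hlen]
        have hgoB : pvGoB out run ((w, t) :: tl) = pvGoB (pvFlushB out run) [] tl := by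
          simp [pvGoB, ht, hne]
        have hfl : pvFlushB out run
            = out ++ run ++ [String.ofList (run.flatMap String.toList)] := by
          simp [pvFlushB, pvFlushIf, hlen', pv_join_empty]
        rw [hgoB, ← hrec (pvFlushB out run), hfl]
      · rw [if_neg hlen]
        by_cases hne : run = []
        · subst hne
          have hgoB : pvGoB out [] ((w, t) :: tl) = pvGoB out [] tl := by
            simp [pvGoB, ht]
          rw [hgoB]
          simpa using hrec out
        · have hlen' : run.length = 1 := by
            have hc : ¬ 1 < run.length := by exact_mod_cast hlen
            have h0 : run.length ≠ 0 := by simpa using hne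
            omega
          have hgoB : pvGoB out run ((w, t) :: tl) = pvGoB (pvFlushB out run) [] tl := by
            simp [pvGoB, ht, hne]
          have hfl : pvFlushB out run = out ++ run := by
            simp [pvFlushB, pvFlushIf, hlen']
          rw [hgoB, ← hrec (pvFlushB out run), hfl]

-- B characterised through takeWhile/dropWhile on any list (one unfolding step)
lemma pv_alt_char (l : List (String × String)) :
    get_index_terms_alt l
      = pvFlushIf ((l.takeWhile pvIsTerm).map Prod.fst)
        ++ get_index_terms_alt (l.dropWhile pvIsTerm) := by
  cases l with
  | nil => simp [get_index_terms_alt, pvFlushIf]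
  | cons hd tl =>
    obtain ⟨w, t⟩ := hd
    by_cases ht : pvIsTerm (w, t)
    · rw [get_index_terms_alt]
      simp [ht, pvFlushIf]
    · have htw : (((w, t) :: tl).takeWhile pvIsTerm) = [] := by simp [ht]
      have hdw : (((w, t) :: tl).dropWhile pvIsTerm) = (w, t) :: tl := by simp [ht]
      rw [htw, hdw]
      simp [pvFlushIf]

-- the run-accumulator loop computes B
lemma pv_goB_eq_alt (l : List (String × String)) :
    ∀ (out run : List String),
      pvGoB out run l
        = out ++ pvFlushIf (run ++ (l.takeWhile pvIsTerm).map Prod.fst)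
          ++ get_index_terms_alt (l.dropWhile pvIsTerm) := by
  induction l with
  | nil => intro out run; simp [pvGoB, pvFlushB, get_index_terms_alt]
  | cons hd tl ih =>
    intro out run
    obtain ⟨w, t⟩ := hd
    by_cases ht : t ∈ pvTagsA
    · have htb : pvIsTerm (w, t) = true := by simp [pvIsTerm, ht]
      have : pvGoB out run ((w, t) :: tl) = pvGoB out (run ++ [w]) tl := by
        simp [pvGoB, ht]
      rw [this, ih]
      simp [htb]
    · have htb : pvIsTerm (w, t) = false := by simp [pvIsTerm, ht]
      have hdw : ((w, t) :: tl).dropWhile pvIsTerm = (w, t) :: tl := by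
        simp [List.dropWhile_cons, htb]
      have htw : ((w, t) :: tl).takeWhile pvIsTerm = [] := by
        simp [List.takeWhile_cons, htb]
      have halt : get_index_terms_alt ((w, t) :: tl) = get_index_terms_alt tl := by
        rw [get_index_terms_alt]; simp [htb]
      by_cases hne : run = []
      · subst hne
        have : pvGoB out [] ((w, t) :: tl) = pvGoB out [] tl := by
          simp [pvGoB, ht]
        rw [this, ih, htw, hdw, halt]
        rw [pv_alt_char tl]
        simp [pvFlushIf]
      · have : pvGoB out run ((w, t) :: tl) = pvGoB (pvFlushB out run) [] tl := by
          simp [pvGoB, ht, hne]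
        rw [this, ih, htw, hdw, halt]
        rw [pv_alt_char tl]
        simp [pvFlushB, pvFlushIf]

-- ===== VERDICT (by name: the statement is the Claim_ definition above) =====
theorem get_index_terms_spec : Claim_equal_get_index_terms := by
  intro mt_list _
  unfold Spec_get_index_terms get_index_terms
  have h1 := pv_main (mt_list.length : Int) mt_list 0 [] [] (by simp) (fun _ => by simp)
  have h2 := pv_goB_eq_alt mt_list [] []
  simp only [List.nil_append] at h2
  rw [← pv_alt_char mt_list] at h2
  simpa [h2] using h1
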